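-- pv_equiv track=rewrite | github.com/AlekseyEA/Algorithms | lab-4/3.py | precalculate_hashes
-- ===== SOURCE A (Python) =====
-- def poly_hash(S, p, x):
--     h = 0
--     for i in range(len(S)):
--         h += ord(S[i]) * (x ** i)
--     return h % p
--
-- def precalculate_hashes(T, P, p, x):
--     len_t = len(T)
--     len_p = len(P)
--     H = [0] * (len_t - len_p + 1)
--     S = T[len_t - len_p:len_t]
--     H[len_t - len_p] = poly_hash(S, p, x)
--
--     y = 1
--     for i in range(len_p):
--         y = (y * x) % p
--     for i in range(len_t - len_p - 1, -1, -1):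
--         H[i] = (x * H[i + 1] + ord(T[i]) - y * ord(T[i + len_p])) % p
--     return H
-- ===== SOURCE B (Python) =====
-- def precalculate_hashes(T, P, p, x):
--     n, m = len(T), len(P)
--     suf = [0] * (n + 1)
--     for i in range(n - 1, -1, -1):
--         suf[i] = (ord(T[i]) + x * suf[i + 1]) % p
--     y = pow(x, m, p)
--     return [(suf[i] - y * suf[i + m]) % p for i in range(n - m + 1)]
-- ===== Notes on version B (the rewrite author's own statement) =====
-- stated objective: faster
-- what changed: B drops A's big-integer poly_hash (which builds x**i terms, O(len_p^2) bit ops) and A's backward sliding recurrence over H; instead one backward Horner pass builds all suffix hashes reduced mod p at every step, and each window hash is suf[i] - pow(x,len_p,p)*suf[i+len_p] mod p, keeping every intermediate bounded by p.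
import Mathlib
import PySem

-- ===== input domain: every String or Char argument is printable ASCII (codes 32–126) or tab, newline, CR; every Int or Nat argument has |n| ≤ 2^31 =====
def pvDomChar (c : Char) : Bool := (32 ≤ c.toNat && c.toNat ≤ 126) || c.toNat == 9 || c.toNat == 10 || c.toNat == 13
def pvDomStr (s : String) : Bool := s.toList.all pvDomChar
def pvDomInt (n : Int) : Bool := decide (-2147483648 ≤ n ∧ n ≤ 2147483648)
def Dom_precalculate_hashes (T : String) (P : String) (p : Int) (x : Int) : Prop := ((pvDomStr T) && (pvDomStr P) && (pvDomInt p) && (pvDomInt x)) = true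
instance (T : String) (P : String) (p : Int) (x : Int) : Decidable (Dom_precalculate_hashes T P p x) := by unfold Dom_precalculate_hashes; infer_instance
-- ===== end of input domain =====

-- B replaces A's O(len_p^2)-bit-op big-integer initial hash (x**i terms) and backward recurrence by a
-- single backward Horner pass of suffix hashes reduced mod p at every step plus pow(x, len_p, p);
-- equivalence of the RETURN value is proved for p ≠ 0 and len(P) ≤ len(T) (elsewhere A raises).

-- ===== PORT A =====
def pvPolyHash (S : List Char) (p : Int) (x : Int) : Int :=
  PySem.Int.mod
    ((PySem.List.pyRange 0 (PySem.List.len S) 1).foldl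
      (fun h i => h + ((PySem.List.pyGetD S i ' ').toNat : Int) * x ^ i.toNat) 0) p

def precalculate_hashes (T : String) (P : String) (p : Int) (x : Int) : List Int :=
  let len_t : Int := PySem.Str.len T
  let len_p : Int := PySem.Str.len P
  let H : List Int := List.replicate (len_t - len_p + 1).toNat 0
  let S : List Char := PySem.List.slice T.toList (some (len_t - len_p)) (some len_t)
  let H : List Int := PySem.List.pySetD H (len_t - len_p) (pvPolyHash S p x)
  let y : Int := (PySem.List.pyRange 0 len_p 1).foldl (fun y _ => PySem.Int.mod (y * x) p) 1
  (PySem.List.pyRange (len_t - len_p - 1) (-1) (-1)).foldl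
    (fun H i =>
      PySem.List.pySetD H i
        (PySem.Int.mod
          (x * PySem.List.pyGetD H (i + 1) 0
            + ((PySem.List.pyGetD T.toList i ' ').toNat : Int)
            - y * ((PySem.List.pyGetD T.toList (i + len_p) ' ').toNat : Int)) p))
    H

-- ===== PORT B =====
-- suffix hashes: pvAltSuf t p x lists (hash of t[i:]) for i = 0..len t, built back to front (Source B's backward loop)
def pvAltSuf (t : List Char) (p : Int) (x : Int) : List Int :=
  match t with
  | [] => [0]
  | c :: rest =>
    let s := pvAltSuf rest p x
    PySem.Int.mod ((c.toNat : Int) + x * s.headI) p :: s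

def precalculate_hashes_alt (T : String) (P : String) (p : Int) (x : Int) : List Int :=
  let t := T.toList
  let m : Nat := P.toList.length
  let suf := pvAltSuf t p x
  let y : Int := PySem.Int.powMod x m p
  (PySem.List.pyRange 0 ((t.length : Int) - (m : Int) + 1) 1).map
    (fun i => PySem.Int.mod (PySem.List.pyGetD suf i 0 - y * PySem.List.pyGetD suf (i + (m : Int)) 0) p)

-- ===== PRECONDITION & SPEC =====
-- Pre_ excludes exactly the inputs where A raises: p = 0 (ZeroDivisionError in the first '% p')
-- and len(P) > len(T) (IndexError: H is empty or too short for the assignment H[len_t - len_p]).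
def Pre_precalculate_hashes (T : String) (P : String) (p : Int) (x : Int) : Prop :=
  p ≠ 0 ∧ P.toList.length ≤ T.toList.length
instance (T : String) (P : String) (p : Int) (x : Int) : Decidable (Pre_precalculate_hashes T P p x) := by unfold Pre_precalculate_hashes; infer_instance

def pvWitness_precalculate_hashes : String × String × Int × Int := ("abc", "ab", 7, 3)

def Spec_precalculate_hashes (T : String) (P : String) (p : Int) (x : Int) (out : List Int) : Prop := out = precalculate_hashes_alt T P p x
instance (T : String) (P : String) (p : Int) (x : Int) (out : List Int) : Decidable (Spec_precalculate_hashes T P p x out) := by unfold Spec_precalculate_hashes; infer_instance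

-- ===== CLAIM (what is proved, stated in full; the proofs are below) =====
def Claim_equal_precalculate_hashes : Prop := ∀ (T : String) (P : String) (p : Int) (x : Int), Dom_precalculate_hashes T P p x → Pre_precalculate_hashes T P p x → Spec_precalculate_hashes T P p x (precalculate_hashes T P p x)

-- ===== LEMMAS AND PROOFS =====

-- Python's % is congruence-friendly: p ∣ a - a % p, and congruent values share a % p.
theorem pvMod_dvd (a p : Int) : p ∣ a - PySem.Int.mod a p := by
  refine ⟨PySem.Int.floordiv a p, ?_⟩
  have h := PySem.Int.floordiv_mul_add_mod a p
  linear_combination -h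

theorem pvMod_congr {p a b : Int} (hp : p ≠ 0) (h : p ∣ a - b) :
    PySem.Int.mod a p = PySem.Int.mod b p := by
  obtain ⟨u, hu⟩ := pvMod_dvd a p
  obtain ⟨v, hv⟩ := pvMod_dvd b p
  obtain ⟨w, hw⟩ := h
  have hc : PySem.Int.mod a p - PySem.Int.mod b p = p * (w - u + v) := by ring_nf; linarith [hu, hv, hw]
  rcases lt_or_gt_of_ne hp with hneg | hpos
  · obtain ⟨h1, h2⟩ := PySem.Int.mod_neg_bounds a hneg
    obtain ⟨h3, h4⟩ := PySem.Int.mod_neg_bounds b hneg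
    have hz : w - u + v = 0 := by nlinarith
    rw [hz, mul_zero] at hc; linarith
  · have h1 := PySem.Int.mod_nonneg a hpos
    have h2 := PySem.Int.mod_lt a hpos
    have h3 := PySem.Int.mod_nonneg b hpos
    have h4 := PySem.Int.mod_lt b hpos
    have hz : w - u + v = 0 := by nlinarith
    rw [hz, mul_zero] at hc; linarith

theorem pvMod_zero {p : Int} (hp : p ≠ 0) : PySem.Int.mod 0 p = 0 := by
  obtain ⟨u, hu⟩ := pvMod_dvd 0 p
  rcases lt_or_gt_of_ne hp with hneg | hpos
  · obtain ⟨h1, h2⟩ := PySem.Int.mod_neg_bounds 0 hneg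
    have hz : u = 0 := by nlinarith
    rw [hz, mul_zero] at hu; linarith
  · have h1 := PySem.Int.mod_nonneg 0 hpos
    have h2 := PySem.Int.mod_lt 0 hpos
    have hz : u = 0 := by nlinarith
    rw [hz, mul_zero] at hu; linarith

-- the (unreduced) polynomial hash, Horner form
def pvPw (x : Int) : List Char → Int
  | [] => 0
  | c :: r => (c.toNat : Int) + x * pvPw x r

theorem pvPw_append (x : Int) (l1 l2 : List Char) :
    pvPw x (l1 ++ l2) = pvPw x l1 + x ^ l1.length * pvPw x l2 := by
  induction l1 with
  | nil => simp [pvPw]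
  | cons c r ih => simp [pvPw, ih]; ring

theorem pvPw_drop (x : Int) (t : List Char) (k : Nat) (hk : k < t.length) :
    pvPw x (t.drop k) = (t[k].toNat : Int) + x * pvPw x (t.drop (k + 1)) := by
  rw [List.drop_eq_getElem_cons hk]; rfl

theorem pvAltSuf_getD {p : Int} (hp : p ≠ 0) (x : Int) :
    ∀ (t : List Char) (k : Nat), k ≤ t.length →
      (pvAltSuf t p x).getD k 0 = PySem.Int.mod (pvPw x (t.drop k)) p := by
  intro t
  induction t with
  | nil =>
    intro k hk
    have hk0 : k = 0 := by simpa using hk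
    subst hk0
    simp [pvAltSuf, pvPw, pvMod_zero hp]
  | cons c r ih =>
    intro k hk
    cases k with
    | zero =>
      have hh : (pvAltSuf r p x).headI = (pvAltSuf r p x).getD 0 0 := by
        cases pvAltSuf r p x <;> simp
      simp only [pvAltSuf, List.getD_cons_zero, List.drop_zero]
      rw [hh, ih 0 (Nat.zero_le _), List.drop_zero]
      refine pvMod_congr hp ?_
      have h1 := pvMod_dvd (pvPw x r) p
      have heq : ((c.toNat : Int) + x * PySem.Int.mod (pvPw x r) p) - pvPw x (c :: r) =
          -(x * (pvPw x r - PySem.Int.mod (pvPw x r) p)) := by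
        simp [pvPw]; ring
      rw [heq]
      exact dvd_neg.mpr (dvd_mul_of_dvd_right h1 x)
    | succ k' =>
      simpa using ih k' (by simpa using hk)

-- A's poly_hash fold computes the Horner value
theorem pvPolyFold (p x : Int) (S : List Char) :
    pvPolyHash S p x = PySem.Int.mod (pvPw x S) p := by
  unfold pvPolyHash
  congr 1
  induction S using List.reverseRecOn with
  | nil =>
    rw [show PySem.List.len ([] : List Char) = 0 by simp,
      PySem.List.pyRange_one_eq_nil (by norm_num)]
    simp [pvPw]
  | append_singleton S' c ih =>
    rw [show PySem.List.len (S' ++ [c]) = ((S'.length : Int) + 1) by simp,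
      PySem.List.pyRange_one_succ_right (by positivity), List.foldl_append]
    rw [show PySem.List.len S' = (S'.length : Int) by simp] at ih
    have hcong : (PySem.List.pyRange 0 (S'.length : Int) 1).foldl
        (fun h i => h + ((PySem.List.pyGetD (S' ++ [c]) i ' ').toNat : Int) * x ^ i.toNat) 0 =
        (PySem.List.pyRange 0 (S'.length : Int) 1).foldl
        (fun h i => h + ((PySem.List.pyGetD S' i ' ').toNat : Int) * x ^ i.toNat) 0 := by
      refine PySem.List.foldl_congr_mem _ _ _ _ ?_
      intro acc i hi
      obtain ⟨h0, hlt⟩ := (PySem.List.mem_pyRange_one).1 hi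
      obtain ⟨k, rfl⟩ : ∃ k : Nat, i = (k : Int) := ⟨i.toNat, by omega⟩
      have hk : k < S'.length := by exact_mod_cast hlt
      rw [PySem.List.pyGetD_natCast, PySem.List.pyGetD_natCast,
        List.getD_eq_getElem _ _ hk,
        List.getD_eq_getElem _ _ (by simp; omega : k < (S' ++ [c]).length),
        List.getElem_append_left hk]
    rw [hcong, ih]
    simp only [List.foldl_cons, List.foldl_nil]
    have hget : PySem.List.pyGetD (S' ++ [c]) (S'.length : Int) ' ' = c := by
      rw [PySem.List.pyGetD_natCast,
        List.getD_eq_getElem _ _ (by simp : S'.length < (S' ++ [c]).length),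
        List.getElem_concat_length rfl]
    rw [hget, pvPw_append]
    simp [pvPw]
    ring

-- A's y-loop is congruent to x^m
theorem pvY (p x : Int) (m : Nat) :
    p ∣ ((PySem.List.pyRange 0 (m : Int) 1).foldl (fun y _ => PySem.Int.mod (y * x) p) 1) - x ^ m := by
  induction m with
  | zero => simp
  | succ m' ih =>
    have : ((m' + 1 : Nat) : Int) = (m' : Int) + 1 := by push_cast; ring
    rw [this, PySem.List.pyRange_one_succ_right (by positivity), List.foldl_append]
    set prev := (PySem.List.pyRange 0 (m' : Int) 1).foldl (fun y _ => PySem.Int.mod (y * x) p) 1 with hprev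
    simp only [List.foldl_cons, List.foldl_nil]
    have h1 := pvMod_dvd (prev * x) p
    have heq : PySem.Int.mod (prev * x) p - x ^ (m' + 1) =
        -(prev * x - PySem.Int.mod (prev * x) p) + (prev - x ^ m') * x := by ring
    rw [heq]
    exact dvd_add (dvd_neg.mpr h1) (dvd_mul_of_dvd_left ih x)

-- the common value of entry k of both results
def pvE (t : List Char) (p x : Int) (m : Nat) (k : Nat) : Int :=
  PySem.Int.mod (pvPw x (t.drop k) - x ^ m * pvPw x (t.drop (k + m))) p

-- invariant of A's backward loop
theorem pvLoopA (t : List Char) (p x yv : Int) (m : Nat) (hp : p ≠ 0)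
    (hy : p ∣ yv - x ^ m) (hm : m ≤ t.length) :
    ∀ (c : Nat) (H : List Int), c ≤ t.length - m → H.length = t.length - m + 1 →
      (∀ j : Nat, c ≤ j → j ≤ t.length - m → H.getD j 0 = pvE t p x m j) →
      ((PySem.List.pyRange ((c : Int) - 1) (-1) (-1)).foldl
          (fun H i => PySem.List.pySetD H i
            (PySem.Int.mod (x * PySem.List.pyGetD H (i + 1) 0
              + ((PySem.List.pyGetD t i ' ').toNat : Int)
              - yv * ((PySem.List.pyGetD t (i + (m : Int)) ' ').toNat : Int)) p)) H).length
          = t.length - m + 1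
        ∧ ∀ j : Nat, j ≤ t.length - m →
          ((PySem.List.pyRange ((c : Int) - 1) (-1) (-1)).foldl
            (fun H i => PySem.List.pySetD H i
              (PySem.Int.mod (x * PySem.List.pyGetD H (i + 1) 0
                + ((PySem.List.pyGetD t i ' ').toNat : Int)
                - yv * ((PySem.List.pyGetD t (i + (m : Int)) ' ').toNat : Int)) p)) H).getD j 0
            = pvE t p x m j := by
  intro c
  induction c with
  | zero =>
    intro H _ hlen hinv
    rw [PySem.List.pyRange_neg_one_eq_nil (by norm_num)]
    exact ⟨hlen, fun j hj => hinv j (Nat.zero_le j) hj⟩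
  | succ c' ih =>
    intro H hc hlen hinv
    have hca : ((c' + 1 : Nat) : Int) - 1 = (c' : Int) := by push_cast; ring
    rw [hca, PySem.List.pyRange_neg_one_cons (by omega), List.foldl_cons]
    -- the value written at index c'
    have hc'N : c' < t.length - m := by omega
    have hc't : c' < t.length := by omega
    have hcmt : c' + m < t.length := by omega
    have hread : PySem.List.pyGetD H ((c' : Int) + 1) 0 = pvE t p x m (c' + 1) := by
      have : ((c' : Int) + 1) = (((c' + 1 : Nat)) : Int) := by push_cast; ring
      rw [this, PySem.List.pyGetD_natCast]
      exact hinv (c' + 1) (Nat.le_refl _) (by omega)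
    have hgt1 : PySem.List.pyGetD t (c' : Int) ' ' = t[c'] := by
      rw [PySem.List.pyGetD_natCast]; exact List.getD_eq_getElem _ _ hc't
    have hgt2 : PySem.List.pyGetD t ((c' : Int) + (m : Int)) ' ' = t[c' + m] := by
      have : ((c' : Int) + (m : Int)) = (((c' + m : Nat)) : Int) := by push_cast; ring
      rw [this, PySem.List.pyGetD_natCast]; exact List.getD_eq_getElem _ _ hcmt
    have hidx : c' + 1 + m = c' + m + 1 := by omega
    have hE1 : pvE t p x m (c' + 1) =
        PySem.Int.mod (pvPw x (t.drop (c' + 1)) - x ^ m * pvPw x (t.drop (c' + m + 1))) p := by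
      unfold pvE; rw [hidx]
    have hE0 : pvE t p x m c' =
        PySem.Int.mod (pvPw x (t.drop c') - x ^ m * pvPw x (t.drop (c' + m))) p := rfl
    have e1 : pvPw x (t.drop c') = (t[c'].toNat : Int) + x * pvPw x (t.drop (c' + 1)) :=
      pvPw_drop x t c' hc't
    have e2 : pvPw x (t.drop (c' + m)) = (t[c' + m].toNat : Int) + x * pvPw x (t.drop (c' + m + 1)) :=
      pvPw_drop x t (c' + m) hcmt
    have hval : PySem.Int.mod (x * PySem.List.pyGetD H ((c' : Int) + 1) 0
        + ((PySem.List.pyGetD t (c' : Int) ' ').toNat : Int)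
        - yv * ((PySem.List.pyGetD t ((c' : Int) + (m : Int)) ' ').toNat : Int)) p
        = pvE t p x m c' := by
      rw [hread, hgt1, hgt2, hE1, hE0]
      refine pvMod_congr hp ?_
      rw [e1, e2]
      set A1 := pvPw x (t.drop (c' + 1)) with hA1
      set B1 := pvPw x (t.drop (c' + m + 1)) with hB1
      have hdv := pvMod_dvd (A1 - x ^ m * B1) p
      have heq : x * PySem.Int.mod (A1 - x ^ m * B1) p + (t[c'].toNat : Int)
            - yv * (t[c' + m].toNat : Int)
            - ((t[c'].toNat : Int) + x * A1 - x ^ m * ((t[c' + m].toNat : Int) + x * B1))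
          = -(x * ((A1 - x ^ m * B1) - PySem.Int.mod (A1 - x ^ m * B1) p))
            - (yv - x ^ m) * (t[c' + m].toNat : Int) := by ring
      rw [heq]
      exact dvd_sub (dvd_neg.mpr (dvd_mul_of_dvd_right hdv x)) (dvd_mul_of_dvd_left hy _)
    rw [hval]
    -- the updated list still satisfies the invariant, one index earlier
    have hlen' : (PySem.List.pySetD H (c' : Int) (pvE t p x m c')).length = t.length - m + 1 := by
      rw [PySem.List.length_pySetD]; exact hlen
    have hinv' : ∀ j : Nat, c' ≤ j → j ≤ t.length - m →
        (PySem.List.pySetD H (c' : Int) (pvE t p x m c')).getD j 0 = pvE t p x m j := by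
      intro j hj1 hj2
      have hcl : c' < H.length := by omega
      have := PySem.List.pyGetD_pySetD_natCast H c' j (pvE t p x m c') 0 hcl
      rw [PySem.List.pyGetD_natCast, PySem.List.pyGetD_natCast] at this
      rw [this]
      by_cases hjc : j = c'
      · simp [hjc]
      · rw [if_neg hjc]; exact hinv j (by omega) hj2
    exact ih _ (by omega) hlen' hinv'

-- A's result, characterised entrywise
theorem pvA_eq (T P : String) (p x : Int) (hp : p ≠ 0)
    (hm : P.toList.length ≤ T.toList.length) :
    precalculate_hashes T P p x =
      (List.range (T.toList.length - P.toList.length + 1)).map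
        (pvE T.toList p x P.toList.length) := by
  unfold precalculate_hashes
  simp only [PySem.Str.len_eq]
  rw [show ((T.toList.length : Int) - (P.toList.length : Int) + 1)
      = ((T.toList.length - P.toList.length + 1 : Nat) : Int) from by omega]
  rw [show ((T.toList.length : Int) - (P.toList.length : Int))
      = ((T.toList.length - P.toList.length : Nat) : Int) from by omega]
  rw [Int.toNat_natCast, PySem.List.slice_natCast, PySem.List.pySetD_natCast]
  set t := T.toList with ht
  set n := t.length with hn
  set m := P.toList.length with hmm
  set N := n - m with hN
  have hslice : (t.drop N).take (n - N) = t.drop N :=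
    List.take_of_length_le (by simp; omega)
  have hpoly : pvPolyHash ((t.drop N).take (n - N)) p x = pvE t p x m N := by
    rw [hslice, pvPolyFold]
    unfold pvE
    rw [show N + m = n from by omega, hn, List.drop_length]
    norm_num [pvPw]
  have hy := pvY p x m
  have hlen1 : ((List.replicate (N + 1) (0 : Int)).set N (pvE t p x m N)).length = N + 1 := by
    simp
  have hinv1 : ∀ j : Nat, N ≤ j → j ≤ N →
      ((List.replicate (N + 1) (0 : Int)).set N (pvE t p x m N)).getD j 0 = pvE t p x m j := by
    intro j hj1 hj2
    have hj : j = N := le_antisymm hj2 hj1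
    subst hj
    rw [List.getD_eq_getElem _ _ (by simp)]
    rw [List.getElem_set_self (by simp)]
  rw [hpoly]
  have hmain := pvLoopA t p x
    ((PySem.List.pyRange 0 (m : Int) 1).foldl (fun y _ => PySem.Int.mod (y * x) p) 1)
    m hp hy (by omega) N _ (Nat.le_refl N) hlen1
    (fun j hj1 hj2 => hinv1 j hj1 (by omega))
  obtain ⟨hL, hG⟩ := hmain
  refine List.ext_getElem (by rw [hL]; simp; omega) ?_
  intro i h1 h2
  have hiN : i ≤ N := by rw [hL] at h1; omega
  have := hG i hiN
  rw [List.getD_eq_getElem _ _ h1] at this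
  rw [this]
  simp

-- B's result, characterised entrywise
theorem pvB_eq (T P : String) (p x : Int) (hp : p ≠ 0)
    (hm : P.toList.length ≤ T.toList.length) :
    precalculate_hashes_alt T P p x =
      (List.range (T.toList.length - P.toList.length + 1)).map
        (pvE T.toList p x P.toList.length) := by
  unfold precalculate_hashes_alt
  simp only []
  rw [show ((T.toList.length : Int) - (P.toList.length : Int) + 1)
      = ((T.toList.length - P.toList.length + 1 : Nat) : Int) from by omega]
  rw [PySem.List.pyRange_one]
  set t := T.toList with ht
  set n := t.length with hn
  set m := P.toList.length with hmm
  set N := n - m with hN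
  rw [show ((((N + 1 : Nat) : Int) - 0).toNat) = N + 1 from by omega]
  rw [List.map_map]
  refine List.map_congr_left ?_
  intro k hk
  have hkN : k < N + 1 := List.mem_range.1 hk
  simp only [Function.comp_apply, zero_add]
  rw [show ((k : Int) + (m : Int)) = ((k + m : Nat) : Int) from by push_cast; ring]
  rw [PySem.List.pyGetD_natCast, PySem.List.pyGetD_natCast]
  rw [pvAltSuf_getD hp x t k (by omega), pvAltSuf_getD hp x t (k + m) (by omega)]
  unfold pvE
  show PySem.Int.mod (PySem.Int.mod (pvPw x (t.drop k)) p
      - PySem.Int.mod (x ^ m) p * PySem.Int.mod (pvPw x (t.drop (k + m))) p) p = _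
  refine pvMod_congr hp ?_
  set A1 := pvPw x (t.drop k)
  set B1 := pvPw x (t.drop (k + m))
  have d1 := pvMod_dvd A1 p
  have d2 := pvMod_dvd (x ^ m) p
  have d3 := pvMod_dvd B1 p
  have heq : (PySem.Int.mod A1 p - PySem.Int.mod (x ^ m) p * PySem.Int.mod B1 p)
      - (A1 - x ^ m * B1)
      = -(A1 - PySem.Int.mod A1 p) - (PySem.Int.mod (x ^ m) p - x ^ m) * PySem.Int.mod B1 p
        + x ^ m * (B1 - PySem.Int.mod B1 p) := by ring
  rw [heq]
  exact dvd_add (dvd_sub (dvd_neg.mpr d1)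
      (dvd_mul_of_dvd_left (by simpa using (dvd_neg.mpr d2)) _))
    (dvd_mul_of_dvd_right d3 _)

-- ===== VERDICT (by name: the statement is the Claim_ definition above) =====
theorem precalculate_hashes_spec : Claim_equal_precalculate_hashes := by
  intro T P p x _ hpre
  obtain ⟨hp, hm⟩ := hpre
  unfold Spec_precalculate_hashes
  rw [pvA_eq T P p x hp hm, pvB_eq T P p x hp hm]
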